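-- pv_equiv track=rewrite | github.com/cctbx/cctbx_project | iotbx/pdb/remark_3_interpretation.py | prepocess_line
-- ===== SOURCE A (Python) =====
-- def prepocess_line(line):
--   l0 = line.split()
--   new_elements = []
--   for l_ in l0:
--     if(l_.isalpha() or l_.isdigit()): new_elements.append(l_)
--     else:
--       try:
--         val = float(l_)
--         new_elements.append(l_)
--       except:
--         tmp = ""
--         for i, c in enumerate(l_):
--           if(i == 0): tmp+=c
--           elif(c in ["+","-"]):
--             if(not l_[i-1].isalpha()):
--               new_elements.append(tmp)
--               tmp = c
--             else: tmp+=c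
--           else: tmp+=c
--         new_elements.append(tmp)
--   return " ".join(new_elements)
-- ===== SOURCE B (Python) =====
-- # B drops A's isalpha/isdigit/try-float classification entirely: tokens that A
-- # keeps whole (letters, digits, valid floats) contain no '+'/'-' preceded by a
-- # non-letter, so the sign splitter already leaves them intact.  Each token is
-- # cut in two staged passes (collect cut positions, then slice) instead of A's
-- # per-character accumulator loop with index lookback.
--
-- def prepocess_line(line):
--     pieces = []
--     for t in line.split():
--         cuts = [i for i in range(1, len(t)) if t[i] in "+-" and not t[i - 1].isalpha()]
--         pieces.extend(t[a:b] for a, b in zip([0] + cuts, cuts + [len(t)]))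
--     return " ".join(pieces)
-- ===== Notes on version B (the rewrite author's own statement) =====
-- stated objective: simpler
-- what changed: B drops A's whole isalpha/isdigit/try-float classification (provably a no-op: tokens A keeps whole contain no '+'/'-' preceded by a non-letter) and replaces the per-character accumulator loop with index lookback by two staged passes per token: collect the cut positions, then slice between consecutive cuts.
import Mathlib
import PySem

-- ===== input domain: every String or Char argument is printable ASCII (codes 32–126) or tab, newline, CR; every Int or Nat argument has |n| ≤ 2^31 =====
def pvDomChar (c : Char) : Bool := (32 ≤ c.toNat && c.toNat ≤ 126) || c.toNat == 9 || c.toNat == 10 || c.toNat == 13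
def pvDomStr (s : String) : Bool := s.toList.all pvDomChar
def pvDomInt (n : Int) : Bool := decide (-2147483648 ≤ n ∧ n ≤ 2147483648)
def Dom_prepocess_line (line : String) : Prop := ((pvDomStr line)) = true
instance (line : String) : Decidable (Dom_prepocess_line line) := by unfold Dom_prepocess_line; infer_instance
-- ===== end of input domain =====

-- B drops A's isalpha/isdigit/try-float classification (a provable no-op: tokens A
-- keeps whole contain no '+'/'-' preceded by a non-letter) and replaces A's
-- enumerate/index-lookback accumulator loop by two staged passes per token:
-- collect the cut positions, then slice between consecutive cuts (objective: simpler).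

-- ===== PORT A =====

-- model of Python's built-in float() acceptance test ('try: float(l_)'):
-- exact for the ASCII, whitespace-free tokens produced by line.split() on Dom
-- (optional sign; digit runs with underscores strictly between digits;
--  forms d, d., d.d, .d with optional exponent; inf/infinity/nan, case-insensitive).
def pvIsDig (c : Char) : Bool := '0' ≤ c && c ≤ '9'

-- consume the tail of a digit run: digits, and '_' only when followed by a digit
def pvDigTail : List Char → List Char
  | [] => []
  | c :: rest =>
    if c == '_' then
      match rest with
      | c2 :: rest2 => if pvIsDig c2 then pvDigTail rest2 else c :: rest
      | [] => c :: rest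
    else if pvIsDig c then pvDigTail rest else c :: rest

-- consume one digit run (digit (digit|'_' digit)*); none if no leading digit
def pvDigits : List Char → Option (List Char)
  | c :: rest => if pvIsDig c then some (pvDigTail rest) else none
  | [] => none

def pvDropSign : List Char → List Char
  | c :: rest => if c == '+' || c == '-' then rest else c :: rest
  | [] => []

def pvExpOk (cs : List Char) : Bool :=
  match pvDigits (pvDropSign cs) with
  | some [] => true
  | _ => false

def pvAfterMant : List Char → Bool
  | [] => true
  | c :: rest => if c == 'e' || c == 'E' then pvExpOk rest else false

-- '.d(igits)' start with no integer part: '.' digits [exp]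
def pvDotStart : List Char → Bool
  | c :: r2 =>
    if c == '.' then
      match pvDigits r2 with
      | some r3 => pvAfterMant r3
      | none => false
    else false
  | [] => false

-- optional fractional part after the integer digits, then the optional exponent
def pvFrac : List Char → Bool
  | [] => pvAfterMant []
  | c :: r2 =>
    if c == '.' then
      match pvDigits r2 with
      | some r3 => pvAfterMant r3
      | none => pvAfterMant r2
    else pvAfterMant (c :: r2)

def pvMantissa (cs : List Char) : Bool :=
  match pvDigits cs with
  | some rest => pvFrac rest
  | none => pvDotStart cs

def pvLowEq (cs : List Char) (s : List Char) : Bool := cs.map PySem.Chars.lowerChar == s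

def pyFloatOk (cs : List Char) : Bool :=
  let body := pvDropSign cs
  pvMantissa body || pvLowEq body ['i','n','f'] ||
    pvLowEq body ['i','n','f','i','n','i','t','y'] || pvLowEq body ['n','a','n']

-- one step of A's inner 'for i, c in enumerate(l_)' loop; state = (new pieces, tmp).
-- l_[i-1] is read with pyGet?; it is always in range here (0 < i < len), so .getD ' '
-- never supplies its default.
def pvStepA (cs : List Char) (st : List String × List Char) (ic : Int × Char) :
    List String × List Char :=
  match st, ic with
  | (acc, tmp), (i, c) =>
    if i == 0 then (acc, tmp ++ [c])
    else if c == '+' || c == '-' then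
      if !(PySem.Chars.isalpha ((PySem.List.pyGet? cs (i - 1)).getD ' ')) then
        (acc ++ [String.ofList tmp], [c])
      else (acc, tmp ++ [c])
    else (acc, tmp ++ [c])

-- A's 'except' branch: the accumulator loop, then append the final tmp
def pvInnerA (cs : List Char) : List String :=
  let st := (PySem.List.enumerate cs 0).foldl (pvStepA cs) ([], [])
  st.1 ++ [String.ofList st.2]

def prepocess_line (line : String) : String :=
  let l0 := PySem.Str.split₀ line
  let newElements := l0.foldl (fun acc l_ =>
    if PySem.Str.strIsalpha l_ || PySem.Str.strIsdigit l_ then acc ++ [l_]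
    else if pyFloatOk l_.toList then acc ++ [l_]
    else acc ++ pvInnerA l_.toList) []
  PySem.Str.join " " newElements

-- ===== PORT B =====

-- Source B: cuts = [i for i in range(1, len(t)) if t[i] in "+-" and not t[i-1].isalpha()]
-- (both indices are always in range, so pyGet?'s .getD ' ' never supplies its default;
--  't[i] in "+-"' is the two-way comparison)
def pvCutsB (cs : List Char) : List Int :=
  (PySem.List.pyRange 1 (cs.length : Int) 1).filter (fun i =>
    (((PySem.List.pyGet? cs i).getD ' ' == '+') || ((PySem.List.pyGet? cs i).getD ' ' == '-')) &&
    !(PySem.Chars.isalpha ((PySem.List.pyGet? cs (i - 1)).getD ' ')))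

-- pieces.extend(t[a:b] for a, b in zip([0] + cuts, cuts + [len(t)]))
def pvInnerB (cs : List Char) : List String :=
  (List.zip ((0 : Int) :: pvCutsB cs) (pvCutsB cs ++ [(cs.length : Int)])).map
    (fun ab => String.ofList (PySem.List.slice cs (some ab.1) (some ab.2)))

def prepocess_line_alt (line : String) : String :=
  PySem.Str.join " "
    ((PySem.Str.split₀ line).foldl (fun acc t => acc ++ pvInnerB t.toList) [])

-- ===== PRECONDITION & SPEC =====
def Spec_prepocess_line (line : String) (out : String) : Prop := out = prepocess_line_alt line
instance (line : String) (out : String) : Decidable (Spec_prepocess_line line out) := by unfold Spec_prepocess_line; infer_instance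

-- ===== CLAIM (what is proved, stated in full; the proofs are below) =====
def Claim_equal_prepocess_line : Prop := ∀ (line : String), Dom_prepocess_line line → Spec_prepocess_line line (prepocess_line line)

-- ===== LEMMAS AND PROOFS =====

-- proof-only intermediate: the recursive one-pass splitter both ports are related to
-- (break before every '+'/'-' whose preceding character is not a letter)
def pvSplitB (prev : Char) (cur : List Char) : List Char → List (List Char)
  | [] => [cur]
  | c :: rest =>
    if (c == '+' || c == '-') && !(PySem.Chars.isalpha prev) then
      cur :: pvSplitB c [c] rest
    else pvSplitB c (cur ++ [c]) rest

def pvBoundSplit : List Char → List (List Char)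
  | [] => [[]]
  | c :: rest => pvSplitB c [c] rest

-- pvCutsB's filter from an arbitrary start index (proof-only generalisation)
def pvCutsFrom (cs : List Char) (k : Int) : List Int :=
  (PySem.List.pyRange k (cs.length : Int) 1).filter (fun i =>
    (((PySem.List.pyGet? cs i).getD ' ' == '+') || ((PySem.List.pyGet? cs i).getD ' ' == '-')) &&
    !(PySem.Chars.isalpha ((PySem.List.pyGet? cs (i - 1)).getD ' ')))

theorem pvCutsB_eq (cs : List Char) : pvCutsB cs = pvCutsFrom cs 1 := rfl


-- 'no split point in cs when the previous character is prev'
def pvOkRun (prev : Char) : List Char → Bool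
  | [] => true
  | c :: rest =>
    (if c == '+' || c == '-' then PySem.Chars.isalpha prev else true) && pvOkRun c rest

theorem pvSplitB_of_okRun (cs : List Char) : ∀ (prev : Char) (cur : List Char),
    pvOkRun prev cs = true → pvSplitB prev cur cs = [cur ++ cs] := by
  induction cs with
  | nil => intro prev cur _; simp [pvSplitB]
  | cons c rest ih =>
    intro prev cur h
    simp only [pvOkRun, Bool.and_eq_true] at h
    by_cases hs : (c == '+' || c == '-') = true
    · have halp : PySem.Chars.isalpha prev = true := by simpa [hs] using h.1
      simp [pvSplitB, hs, halp, ih c (cur ++ [c]) h.2]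
    · simp [pvSplitB, hs, ih c (cur ++ [c]) h.2]

theorem pvOkRun_of_noSign (cs : List Char) : ∀ (prev : Char),
    (cs.all fun c => !(c == '+' || c == '-')) = true → pvOkRun prev cs = true := by
  induction cs with
  | nil => intro prev _; rfl
  | cons c rest ih =>
    intro prev h
    simp only [List.all_cons, Bool.and_eq_true] at h
    have : (c == '+' || c == '-') = false := by simpa using h.1
    simp [pvOkRun, this, ih c h.2]

theorem pvDig_notSign (c : Char) (h : pvIsDig c = true) : (c == '+' || c == '-') = false := by
  simp only [pvIsDig, Bool.and_eq_true, decide_eq_true_eq] at h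
  simp only [Bool.or_eq_false_iff, beq_eq_false_iff_ne]
  exact ⟨by rintro rfl; exact absurd h.1 (by decide),
         by rintro rfl; exact absurd h.1 (by decide)⟩

theorem pvDigTail_okRun : ∀ (cs rest : List Char), pvDigTail cs = rest →
    (∀ p, pvOkRun p rest = true) → ∀ prev, pvOkRun prev cs = true := by
  intro cs
  induction cs using pvDigTail.induct with
  | case1 => intro rest _ _ prev; rfl
  | case2 c hc c2 rest2 hd ih =>
    intro rest heq hrest prev
    simp only [pvDigTail, hc, hd, if_true] at heq
    have h1 : (c == '+' || c == '-') = false := by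
      rw [beq_iff_eq] at hc; subst hc; decide
    simp only [pvOkRun, h1, Bool.false_eq_true, if_false, pvDig_notSign c2 hd,
      Bool.true_and]
    exact ih rest heq hrest c2
  | case3 c hc c2 rest2 hd =>
    intro rest heq hrest prev
    have hd' : pvIsDig c2 = false := by simpa using hd
    simp only [pvDigTail, hc, hd', if_true, if_false, Bool.false_eq_true] at heq
    rw [← heq] at hrest; exact hrest prev
  | case4 c hc =>
    intro rest heq hrest prev
    simp only [pvDigTail, hc, if_true] at heq
    rw [← heq] at hrest; exact hrest prev
  | case5 c r hc hd ih =>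
    intro rest heq hrest prev
    have hc' : (c == '_') = false := by simpa using hc
    rw [pvDigTail.eq_def] at heq
    simp only [hc', hd, if_true, if_false, Bool.false_eq_true] at heq
    simp only [pvOkRun, pvDig_notSign c hd, Bool.false_eq_true, if_false, Bool.true_and]
    exact ih rest heq hrest c
  | case6 c r hc hd =>
    intro rest heq hrest prev
    have hc' : (c == '_') = false := by simpa using hc
    have hd' : pvIsDig c = false := by simpa using hd
    rw [pvDigTail.eq_def] at heq
    simp only [hc', hd', if_false, Bool.false_eq_true] at heq
    rw [← heq] at hrest; exact hrest prev

theorem pvDigits_okRun (cs rest : List Char) (h : pvDigits cs = some rest)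
    (hrest : ∀ p, pvOkRun p rest = true) : ∀ prev, pvOkRun prev cs = true := by
  intro prev
  cases cs with
  | nil => simp [pvDigits] at h
  | cons c r =>
    rw [pvDigits] at h
    by_cases hd : pvIsDig c = true
    · rw [if_pos hd, Option.some_inj] at h
      simp only [pvOkRun, pvDig_notSign c hd, Bool.false_eq_true, if_false, Bool.true_and]
      exact pvDigTail_okRun r rest h hrest c
    · rw [if_neg hd] at h; exact absurd h (by simp)

theorem pvExpOk_okRun (cs : List Char) (h : pvExpOk cs = true) :
    ∀ prev, PySem.Chars.isalpha prev = true → pvOkRun prev cs = true := by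
  intro prev halp
  unfold pvExpOk at h
  cases hd : pvDigits (pvDropSign cs) with
  | none => rw [hd] at h; simp at h
  | some r =>
    rw [hd] at h
    cases r with
    | cons _ _ => simp at h
    | nil =>
      have hrun : ∀ p, pvOkRun p (pvDropSign cs) = true :=
        fun p => pvDigits_okRun _ [] hd (fun _ => rfl) p
      cases cs with
      | nil => rfl
      | cons c rest =>
        rw [pvDropSign] at hrun
        by_cases hs : (c == '+' || c == '-') = true
        · rw [if_pos hs] at hrun
          simp [pvOkRun, hs, halp, hrun c]
        · rw [if_neg hs] at hrun
          exact hrun prev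

theorem pvAfterMant_okRun (cs : List Char) (h : pvAfterMant cs = true) :
    ∀ prev, pvOkRun prev cs = true := by
  intro prev
  cases cs with
  | nil => rfl
  | cons c rest =>
    rw [pvAfterMant] at h
    by_cases he : (c == 'e' || c == 'E') = true
    · rw [if_pos he] at h
      have hca : PySem.Chars.isalpha c = true := by
        rcases Bool.or_eq_true_iff.1 he with h1 | h1 <;>
          (rw [beq_iff_eq] at h1; subst h1; decide)
      have hcs : (c == '+' || c == '-') = false := by
        rcases Bool.or_eq_true_iff.1 he with h1 | h1 <;>
          (rw [beq_iff_eq] at h1; subst h1; decide)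
      simp [pvOkRun, hcs, pvExpOk_okRun rest h c hca]
    · rw [if_neg he] at h; exact absurd h (by simp)

theorem pvDotStart_okRun (cs : List Char) (h : pvDotStart cs = true) :
    ∀ p, pvOkRun p cs = true := by
  intro p
  cases cs with
  | nil => rfl
  | cons c r2 =>
    rw [pvDotStart] at h
    by_cases hdot : (c == '.') = true
    · rw [if_pos hdot] at h
      have hc : (c == '+' || c == '-') = false := by
        rw [beq_iff_eq] at hdot; subst hdot; decide
      cases hd2 : pvDigits r2 with
      | some r3 =>
        rw [hd2] at h
        have := pvDigits_okRun r2 r3 hd2 (pvAfterMant_okRun r3 h)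
        simp [pvOkRun, hc, this c]
      | none => rw [hd2] at h; exact absurd h (by simp)
    · rw [if_neg hdot] at h; exact absurd h (by simp)

theorem pvFrac_okRun (rest : List Char) (h : pvFrac rest = true) :
    ∀ p, pvOkRun p rest = true := by
  intro p
  cases rest with
  | nil => rfl
  | cons c r2 =>
    rw [pvFrac] at h
    by_cases hdot : (c == '.') = true
    · rw [if_pos hdot] at h
      have hc : (c == '+' || c == '-') = false := by
        rw [beq_iff_eq] at hdot; subst hdot; decide
      cases hd2 : pvDigits r2 with
      | some r3 =>
        rw [hd2] at h
        have := pvDigits_okRun r2 r3 hd2 (pvAfterMant_okRun r3 h)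
        simp [pvOkRun, hc, this c]
      | none =>
        rw [hd2] at h
        simp [pvOkRun, hc, pvAfterMant_okRun r2 h c]
    · rw [if_neg hdot] at h
      exact pvAfterMant_okRun _ h p

theorem pvMantissa_okRun (cs : List Char) (h : pvMantissa cs = true) :
    ∀ prev, pvOkRun prev cs = true := by
  intro prev
  unfold pvMantissa at h
  cases hd : pvDigits cs with
  | some rest =>
    rw [hd] at h
    exact pvDigits_okRun cs rest hd (pvFrac_okRun rest h) prev
  | none =>
    rw [hd] at h
    exact pvDotStart_okRun cs h prev

theorem pvLowEq_noSign (cs l : List Char) (h : pvLowEq cs l = true)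
    (hl : ∀ c ∈ l, c ≠ '+' ∧ c ≠ '-') :
    (cs.all fun c => !(c == '+' || c == '-')) = true := by
  unfold pvLowEq at h
  rw [beq_iff_eq] at h
  rw [List.all_eq_true]
  intro c hc
  have hmem : PySem.Chars.lowerChar c ∈ l := h ▸ List.mem_map_of_mem hc
  have := hl _ hmem
  simp only [Bool.not_eq_eq_eq_not, Bool.not_true, Bool.or_eq_false_iff, beq_eq_false_iff_ne]
  constructor
  · intro hc'; subst hc'; exact this.1 (by decide)
  · intro hc'; subst hc'; exact this.2 (by decide)

theorem pvInfChars : ∀ c ∈ (['i','n','f'] : List Char), c ≠ '+' ∧ c ≠ '-' := by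
  intro c hc; fin_cases hc <;> exact ⟨by decide, by decide⟩

theorem pvInfinityChars :
    ∀ c ∈ (['i','n','f','i','n','i','t','y'] : List Char), c ≠ '+' ∧ c ≠ '-' := by
  intro c hc; fin_cases hc <;> exact ⟨by decide, by decide⟩

theorem pvNanChars : ∀ c ∈ (['n','a','n'] : List Char), c ≠ '+' ∧ c ≠ '-' := by
  intro c hc; fin_cases hc <;> exact ⟨by decide, by decide⟩

theorem pvBoundSplit_whole' (cs : List Char)
    (h : (cs.all fun c => !(c == '+' || c == '-')) = true) (hne : cs ≠ []) :
    pvBoundSplit cs = [cs] := by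
  cases cs with
  | nil => exact absurd rfl hne
  | cons c rest =>
    simp only [List.all_cons, Bool.and_eq_true] at h
    simpa [pvBoundSplit] using pvSplitB_of_okRun rest c [c] (pvOkRun_of_noSign rest c h.2)

theorem pvFloat_boundSplit (cs : List Char) (h : pyFloatOk cs = true) :
    pvBoundSplit cs = [cs] := by
  cases cs with
  | nil => exact absurd h (by decide)
  | cons c rest =>
    have hbody : ∀ p, pvOkRun p (pvDropSign (c :: rest)) = true := by
      unfold pyFloatOk at h
      simp only [Bool.or_eq_true] at h
      rcases h with ((hm | h1) | h2) | h3
      · exact pvMantissa_okRun _ hm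
      · exact fun p => pvOkRun_of_noSign _ p (pvLowEq_noSign _ _ h1 pvInfChars)
      · exact fun p => pvOkRun_of_noSign _ p (pvLowEq_noSign _ _ h2 pvInfinityChars)
      · exact fun p => pvOkRun_of_noSign _ p (pvLowEq_noSign _ _ h3 pvNanChars)
    rw [pvDropSign] at hbody
    by_cases hs : (c == '+' || c == '-') = true
    · rw [if_pos hs] at hbody
      simpa [pvBoundSplit] using pvSplitB_of_okRun rest c [c] (hbody c)
    · rw [if_neg hs] at hbody
      have := hbody 'a'
      simp only [pvOkRun, hs, Bool.false_eq_true, if_false, Bool.true_and] at this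
      simpa [pvBoundSplit] using pvSplitB_of_okRun rest c [c] this

theorem pvAlpha_boundSplit (t : String) (h : PySem.Str.strIsalpha t = true) :
    pvBoundSplit t.toList = [t.toList] := by
  rw [PySem.Str.strIsalpha_eq] at h
  unfold PySem.Chars.strIsalpha at h
  simp only [Bool.and_eq_true, List.all_eq_true] at h
  refine pvBoundSplit_whole' _ ?_ (by simpa [List.isEmpty_iff] using h.1)
  rw [List.all_eq_true]
  intro c hc
  have halp := h.2 c hc
  simp only [Bool.not_eq_eq_eq_not, Bool.not_true, Bool.or_eq_false_iff, beq_eq_false_iff_ne]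
  constructor <;> (intro hc'; subst hc'; exact absurd halp (by decide))

theorem pvDigit_boundSplit (t : String) (h : PySem.Str.strIsdigit t = true) :
    pvBoundSplit t.toList = [t.toList] := by
  rw [PySem.Str.strIsdigit_eq] at h
  unfold PySem.Chars.strIsdigit at h
  simp only [Bool.and_eq_true, List.all_eq_true] at h
  refine pvBoundSplit_whole' _ ?_ (by simpa [List.isEmpty_iff] using h.1)
  rw [List.all_eq_true]
  intro c hc
  have hdig := h.2 c hc
  simp only [Bool.not_eq_eq_eq_not, Bool.not_true, Bool.or_eq_false_iff, beq_eq_false_iff_ne]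
  constructor <;> (intro hc'; subst hc'; exact absurd hdig (by decide))

-- invariant of A's inner loop from index pre.length on, for nonempty pre ending in prev
theorem pvInner_loop (rest : List Char) : ∀ (pre : List Char) (prev : Char)
    (acc : List String) (tmp : List Char), pre ≠ [] → pre.getLast? = some prev →
    (let st := (PySem.List.enumerate rest (pre.length : Int)).foldl
        (pvStepA (pre ++ rest)) (acc, tmp)
     st.1 ++ [String.ofList st.2]) = acc ++ (pvSplitB prev tmp rest).map String.ofList := by
  induction rest with
  | nil => intro pre prev acc tmp _ _; simp [PySem.List.enumerate, pvSplitB]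
  | cons c rest ih =>
    intro pre prev acc tmp hne hlast
    have hlen : 1 ≤ pre.length := by
      cases pre with | nil => exact absurd rfl hne | cons a l => simp
    have hidx : PySem.List.pyGet? (pre ++ c :: rest) ((pre.length : Int) - 1)
        = some prev := by
      have h1 : ((pre.length : Int) - 1) = ((pre.length - 1 : Nat) : Int) := by
        omega
      rw [h1, PySem.List.pyGet?_natCast]
      rw [List.getElem?_append_left (by omega)]
      rw [← List.getLast?_eq_getElem?]
      exact hlast
    have hi0 : ((pre.length : Int) == 0) = false := by
      simp; omega
    rw [PySem.List.enumerate_cons]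
    simp only [List.foldl_cons]
    by_cases hsig : (c == '+' || c == '-') = true
    · by_cases halp : PySem.Chars.isalpha prev = true
      · -- sign after a letter: keep accumulating
        have hstep : pvStepA (pre ++ c :: rest) (acc, tmp) ((pre.length : Int), c)
            = (acc, tmp ++ [c]) := by
          simp [pvStepA, hi0, hsig, hidx, halp]
        rw [hstep]
        have hre : pre ++ c :: rest = (pre ++ [c]) ++ rest := by simp
        have hlen2 : ((pre.length : Int) + 1) = ((pre ++ [c]).length : Int) := by
          simp
        rw [hre, hlen2]
        rw [ih (pre ++ [c]) c acc (tmp ++ [c]) (by simp) (by simp)]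
        simp [pvSplitB, hsig, halp]
      · -- split point
        have hstep : pvStepA (pre ++ c :: rest) (acc, tmp) ((pre.length : Int), c)
            = (acc ++ [String.ofList tmp], [c]) := by
          simp [pvStepA, hi0, hsig, hidx, halp]
        rw [hstep]
        have hre : pre ++ c :: rest = (pre ++ [c]) ++ rest := by simp
        have hlen2 : ((pre.length : Int) + 1) = ((pre ++ [c]).length : Int) := by
          simp
        rw [hre, hlen2]
        rw [ih (pre ++ [c]) c (acc ++ [String.ofList tmp]) [c] (by simp) (by simp)]
        simp [pvSplitB, hsig, halp]
    · have hstep : pvStepA (pre ++ c :: rest) (acc, tmp) ((pre.length : Int), c)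
          = (acc, tmp ++ [c]) := by
        simp only [pvStepA, hi0]
        simp [hsig]
      rw [hstep]
      have hre : pre ++ c :: rest = (pre ++ [c]) ++ rest := by simp
      have hlen2 : ((pre.length : Int) + 1) = ((pre ++ [c]).length : Int) := by
        simp
      rw [hre, hlen2]
      rw [ih (pre ++ [c]) c acc (tmp ++ [c]) (by simp) (by simp)]
      simp [pvSplitB, hsig]

theorem pvInnerA_eq (cs : List Char) :
    pvInnerA cs = (pvBoundSplit cs).map String.ofList := by
  cases cs with
  | nil => simp [pvInnerA, pvBoundSplit, PySem.List.enumerate]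
  | cons c rest =>
    unfold pvInnerA pvBoundSplit
    rw [PySem.List.enumerate_cons]
    simp only [List.foldl_cons]
    have h0 : pvStepA (c :: rest) ([], []) ((0 : Int), c) = ([], [c]) := by
      simp [pvStepA]
    rw [h0]
    have := pvInner_loop rest [c] c [] [c] (by simp) (by simp)
    simpa using this

theorem pvInnerB_loop (cs : List Char) : ∀ (rest init : List Char) (a : Nat) (prev : Char),
    cs = init ++ rest → init ≠ [] → init.getLast? = some prev → a ≤ init.length →
    (List.zip ((a : Int) :: pvCutsFrom cs (init.length : Int))
        (pvCutsFrom cs (init.length : Int) ++ [(cs.length : Int)])).map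
        (fun ab => String.ofList (PySem.List.slice cs (some ab.1) (some ab.2)))
      = (pvSplitB prev ((cs.drop a).take (init.length - a)) rest).map String.ofList := by
  intro rest
  induction rest with
  | nil =>
    intro init a prev hcs hne hlast ha
    have hlen : (init.length : Int) = (cs.length : Int) := by subst hcs; simp
    have hcuts : pvCutsFrom cs (init.length : Int) = [] := by
      unfold pvCutsFrom
      rw [hlen]
      simp
    rw [hcuts]
    simp only [List.zip_cons_cons, List.nil_append, List.zip_nil_right, List.map_cons,
      List.map_nil, pvSplitB]
    rw [PySem.List.slice_natCast]
    subst hcs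
    simp
  | cons c rest ih =>
    intro init a prev hcs hne hlast ha
    have hk1 : 1 ≤ init.length := by
      cases init with | nil => exact absurd rfl hne | cons x l => simp
    have hkn : (init.length : Int) < (cs.length : Int) := by
      have : init.length < cs.length := by subst hcs; simp
      exact_mod_cast this
    have hgetk : PySem.List.pyGet? cs (init.length : Int) = some c := by
      rw [PySem.List.pyGet?_natCast, hcs, List.getElem?_append_right (Nat.le_refl _)]
      simp
    have hgetk1 : PySem.List.pyGet? cs ((init.length : Int) - 1) = some prev := by
      have h1 : ((init.length : Int) - 1) = ((init.length - 1 : Nat) : Int) := by omega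
      rw [h1, PySem.List.pyGet?_natCast, hcs, List.getElem?_append_left (by omega),
        ← List.getLast?_eq_getElem?]
      exact hlast
    have hdropk : cs.drop init.length = c :: rest := by
      rw [hcs, List.drop_left]
    have hcuts : pvCutsFrom cs (init.length : Int) =
        (if ((c == '+') || (c == '-')) && !(PySem.Chars.isalpha prev) then
          [(init.length : Int)] else []) ++ pvCutsFrom cs ((init.length : Int) + 1) := by
      unfold pvCutsFrom
      rw [PySem.List.pyRange_one_cons hkn]
      simp only [List.filter_cons]
      rw [hgetk, hgetk1]
      simp only [Option.getD_some]
      split_ifs with hbrk <;> simp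
    by_cases hbrk : (((c == '+') || (c == '-')) && !(PySem.Chars.isalpha prev)) = true
    · rw [hcuts, if_pos hbrk]
      simp only [List.zip_cons_cons, List.cons_append, List.nil_append, List.map_cons]
      have hih := ih (init ++ [c]) init.length c (by simpa using hcs) (by simp) (by simp)
        (by simp)
      simp only [List.length_append, List.length_cons, List.length_nil, Nat.zero_add,
        Nat.cast_add, Nat.cast_one] at hih
      have htake : (cs.drop init.length).take (init.length + 1 - init.length) = [c] := by
        rw [hdropk]; simp
      rw [htake] at hih
      rw [hih]
      have hsplit : pvSplitB prev ((cs.drop a).take (init.length - a)) (c :: rest)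
          = ((cs.drop a).take (init.length - a)) :: pvSplitB c [c] rest := by
        rw [pvSplitB, if_pos hbrk]
      rw [hsplit, List.map_cons, PySem.List.slice_natCast]
    · rw [hcuts, if_neg hbrk]
      simp only [List.nil_append]
      have hih := ih (init ++ [c]) a c (by simpa using hcs) (by simp) (by simp)
        (by simp; omega)
      simp only [List.length_append, List.length_cons, List.length_nil, Nat.zero_add,
        Nat.cast_add, Nat.cast_one] at hih
      have htake : (cs.drop a).take (init.length + 1 - a)
          = (cs.drop a).take (init.length - a) ++ [c] := by
        have h1 : init.length + 1 - a = (init.length - a) + 1 := by omega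
        rw [h1, List.take_add_one]
        have h2 : (cs.drop a)[init.length - a]? = some c := by
          rw [List.getElem?_drop]
          have h3 : a + (init.length - a) = init.length := by omega
          rw [h3, hcs, List.getElem?_append_right (Nat.le_refl _)]
          simp
        rw [h2]; rfl
      rw [htake] at hih
      rw [hih]
      have hsplit : pvSplitB prev ((cs.drop a).take (init.length - a)) (c :: rest)
          = pvSplitB c (((cs.drop a).take (init.length - a)) ++ [c]) rest := by
        rw [pvSplitB, if_neg (by simpa using hbrk)]
      rw [hsplit]

theorem pvInnerB_eq (cs : List Char) :
    pvInnerB cs = (pvBoundSplit cs).map String.ofList := by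
  cases cs with
  | nil => decide
  | cons c rest =>
    unfold pvInnerB
    rw [pvCutsB_eq]
    have h := pvInnerB_loop (c :: rest) rest [c] 0 c rfl (by simp) (by simp) (by simp)
    simp only [List.length_cons, List.length_nil, Nat.zero_add, Nat.cast_one, Nat.cast_zero,
      List.drop_zero, Nat.sub_zero] at h
    rw [show ((c :: rest).take 1) = [c] from rfl] at h
    simp only [List.length_cons]
    rw [h]
    rfl

theorem pvStepOuter_eq : (fun (acc : List String) (l_ : String) =>
    if PySem.Str.strIsalpha l_ || PySem.Str.strIsdigit l_ then acc ++ [l_]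
    else if pyFloatOk l_.toList then acc ++ [l_]
    else acc ++ pvInnerA l_.toList)
    = (fun (acc : List String) l_ => acc ++ pvInnerB l_.toList) := by
  funext acc l_
  rw [pvInnerB_eq]
  split_ifs with h1 h2
  · rcases Bool.or_eq_true_iff.1 h1 with h | h
    · rw [pvAlpha_boundSplit l_ h]; simp
    · rw [pvDigit_boundSplit l_ h]; simp
  · rw [pvFloat_boundSplit _ h2]; simp
  · rw [pvInnerA_eq]

theorem prepocess_line_spec : Claim_equal_prepocess_line := by
  intro line _
  show PySem.Str.join " " ((PySem.Str.split₀ line).foldl (fun acc l_ =>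
      if PySem.Str.strIsalpha l_ || PySem.Str.strIsdigit l_ then acc ++ [l_]
      else if pyFloatOk l_.toList then acc ++ [l_]
      else acc ++ pvInnerA l_.toList) []) = prepocess_line_alt line
  rw [pvStepOuter_eq]
  rfl

-- ===== VERDICT (by name: the statement is the Claim_ definition above) =====
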